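-- pv_equiv track=rewrite | github.com/maxrusse/RadIMO_SBZ_DEV | app.py | apply_roster_overrides
-- ===== SOURCE A (Python) =====
-- def apply_roster_overrides(
--     base_skills: dict,
--     canonical_id: str,
--     modality: str,
--     worker_roster: dict
-- ) -> dict:
--     """
--     Apply per-worker skill overrides from worker_skill_roster.
--
--     Priority (highest to lowest):
--     1. Day Edit (same day / prep next day) - handled separately, always wins
--     2. medweb + roster merge (this function)
--
--     Roster rules:
--     - roster -1 = ALWAYS wins (worker excluded from this skill)
--     - roster 0/1 = NO effect (roster cannot upgrade, only restrict)
--     - medweb defines the assignment, roster can only exclude with -1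
--
--     Examples:
--     | medweb | roster | result | reason                              |
--     |--------|--------|--------|-------------------------------------|
--     |   1    |   1    |   1    | assigned                            |
--     |   1    |   0    |   1    | assigned (roster can't downgrade)   |
--     |   1    |  -1    |  -1    | roster -1 ALWAYS wins (excluded)    |
--     |   0    |   1    |   0    | not assigned (roster can't upgrade) |
--     |   0    |   0    |   0    | not assigned                        |
--     |   0    |  -1    |  -1    | roster -1 ALWAYS wins (excluded)    |
--     """
--     if canonical_id not in worker_roster:
--         return base_skills.copy()
--
--     final_skills = base_skills.copy()
--
--     def merge_skill(base_val: int, roster_val: int) -> int: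
--         # -1 from roster ALWAYS wins (worker cannot do this skill)
--         if roster_val == -1:
--             return -1
--         # Roster 0 or 1 cannot change medweb assignment
--         # Only -1 can override, everything else keeps medweb value
--         return base_val
--
--     # Apply default overrides (only -1 matters)
--     if 'default' in worker_roster[canonical_id]:
--         for skill, roster_val in worker_roster[canonical_id]['default'].items():
--             if skill in final_skills:
--                 final_skills[skill] = merge_skill(final_skills[skill], roster_val)
--
--     # Apply modality-specific overrides (only -1 matters, takes precedence)
--     if modality in worker_roster[canonical_id]:
--         for skill, roster_val in worker_roster[canonical_id][modality].items():
--             if skill in final_skills: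
--                 # Modality-specific -1 can override even if default was different
--                 final_skills[skill] = merge_skill(final_skills[skill], roster_val)
--
--     return final_skills
-- ===== SOURCE B (Python) =====
-- def apply_roster_overrides(
--     base_skills: dict,
--     canonical_id: str,
--     modality: str,
--     worker_roster: dict
-- ) -> dict:
--     if canonical_id not in worker_roster:
--         return base_skills.copy()
--     entry = worker_roster[canonical_id]
--     excluded = {skill
--                 for key in ('default', modality)
--                 for skill, v in entry.get(key, {}).items()
--                 if v == -1}
--     return {skill: (-1 if skill in excluded else val)
--             for skill, val in base_skills.items()}
-- ===== Notes on version B (the rewrite author's own statement) =====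
-- stated objective: simpler
-- what changed: Instead of copying the dict and running two in-place mutating override loops through a merge_skill helper, B first builds one set of excluded skills (roster value -1 from 'default' and from the modality section) and then rebuilds the result in a single comprehension pass over base_skills; Pre_ only excludes association lists whose base_skills keys are duplicated, which represent no Python dict.
import Mathlib
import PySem

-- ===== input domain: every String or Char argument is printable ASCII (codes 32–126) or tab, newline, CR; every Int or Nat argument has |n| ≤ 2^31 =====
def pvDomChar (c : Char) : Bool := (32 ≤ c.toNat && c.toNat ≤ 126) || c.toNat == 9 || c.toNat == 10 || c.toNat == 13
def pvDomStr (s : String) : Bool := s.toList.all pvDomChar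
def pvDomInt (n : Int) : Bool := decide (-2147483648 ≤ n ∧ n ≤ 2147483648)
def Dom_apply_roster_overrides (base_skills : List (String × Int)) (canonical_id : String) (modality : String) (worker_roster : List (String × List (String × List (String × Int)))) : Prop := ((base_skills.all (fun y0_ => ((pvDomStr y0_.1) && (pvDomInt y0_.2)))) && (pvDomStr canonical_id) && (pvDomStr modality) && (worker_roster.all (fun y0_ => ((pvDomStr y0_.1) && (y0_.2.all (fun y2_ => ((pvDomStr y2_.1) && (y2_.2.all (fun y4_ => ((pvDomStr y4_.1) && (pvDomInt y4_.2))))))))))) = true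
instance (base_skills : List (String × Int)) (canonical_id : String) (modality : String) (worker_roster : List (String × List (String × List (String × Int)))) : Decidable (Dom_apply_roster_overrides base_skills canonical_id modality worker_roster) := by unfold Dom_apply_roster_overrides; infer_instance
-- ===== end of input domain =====

-- B replaces A's two in-place mutating override loops by building one exclusion set and
-- rebuilding the result in a single pass over base_skills (objective: simpler).

-- ===== PORT A =====
-- merge_skill, the inner helper of A
def pvMergeSkill (base_val : Int) (roster_val : Int) : Int :=
  if roster_val = -1 then -1 else base_val

-- one iteration of A's override loops: 'if skill in final_skills: final_skills[skill] = merge_skill(final_skills[skill], roster_val)'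
def pvStepA (f : PySem.Dict String Int) (q : String × Int) : PySem.Dict String Int :=
  if f.contains q.1 then f.insert q.1 (pvMergeSkill (f.getD q.1 0) q.2) else f

def apply_roster_overrides (base_skills : List (String × Int)) (canonical_id : String) (modality : String) (worker_roster : List (String × List (String × List (String × Int)))) : List (String × Int) :=
  let roster := PySem.Dict.mk worker_roster
  if !roster.contains canonical_id then
    base_skills
  else
    let entry := PySem.Dict.mk (roster.getD canonical_id [])
    let final0 := PySem.Dict.mk base_skills
    let final1 :=
      if entry.contains "default" then
        (entry.getD "default" []).foldl pvStepA final0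
      else final0
    let final2 :=
      if entry.contains modality then
        (entry.getD modality []).foldl pvStepA final1
      else final1
    final2.items

-- ===== PORT B =====
def apply_roster_overrides_alt (base_skills : List (String × Int)) (canonical_id : String) (modality : String) (worker_roster : List (String × List (String × List (String × Int)))) : List (String × Int) :=
  let roster := PySem.Dict.mk worker_roster
  if !roster.contains canonical_id then
    base_skills
  else
    let entry := PySem.Dict.mk (roster.getD canonical_id [])
    -- the set comprehension over ('default', modality)
    let excluded : PySem.Set String :=
      PySem.Set.ofList ((((entry.getD "default" []) ++ (entry.getD modality [])).filter (fun q => q.2 == -1)).map (·.1))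
    -- the final dict comprehension over base_skills
    base_skills.map (fun p => if PySem.Set.contains excluded p.1 then (p.1, -1) else p)

-- ===== PRECONDITION & SPEC =====
-- Pre_ excludes only base_skills association lists with duplicate keys: such lists represent
-- no Python dict (every Python input has unique keys), and on them the list encoding of A's
-- dict update is accidental.
def Pre_apply_roster_overrides (base_skills : List (String × Int)) (canonical_id : String) (modality : String) (worker_roster : List (String × List (String × List (String × Int)))) : Prop :=
  (base_skills.map Prod.fst).Nodup
instance (base_skills : List (String × Int)) (canonical_id : String) (modality : String) (worker_roster : List (String × List (String × List (String × Int)))) : Decidable (Pre_apply_roster_overrides base_skills canonical_id modality worker_roster) := by unfold Pre_apply_roster_overrides; infer_instance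

def pvWitness_apply_roster_overrides : (List (String × Int)) × String × String × (List (String × List (String × List (String × Int)))) :=
  ([("ct", 1), ("mr", 0)], "w1", "CT", [("w1", [("default", [("ct", -1)]), ("CT", [("mr", -1)])])])

def Spec_apply_roster_overrides (base_skills : List (String × Int)) (canonical_id : String) (modality : String) (worker_roster : List (String × List (String × List (String × Int)))) (out : List (String × Int)) : Prop := out = apply_roster_overrides_alt base_skills canonical_id modality worker_roster
instance (base_skills : List (String × Int)) (canonical_id : String) (modality : String) (worker_roster : List (String × List (String × List (String × Int)))) (out : List (String × Int)) : Decidable (Spec_apply_roster_overrides base_skills canonical_id modality worker_roster out) := by unfold Spec_apply_roster_overrides; infer_instance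

-- ===== CLAIM (what is proved, stated in full; the proofs are below) =====
def Claim_equal_apply_roster_overrides : Prop := ∀ (base_skills : List (String × Int)) (canonical_id : String) (modality : String) (worker_roster : List (String × List (String × List (String × Int)))), Dom_apply_roster_overrides base_skills canonical_id modality worker_roster → Pre_apply_roster_overrides base_skills canonical_id modality worker_roster → Spec_apply_roster_overrides base_skills canonical_id modality worker_roster (apply_roster_overrides base_skills canonical_id modality worker_roster)

-- ===== LEMMAS AND PROOFS =====

-- 'is this skill excluded by the override list l?'
def pvExcl (l : List (String × Int)) (a : String) : Bool :=
  l.any (fun q => q.1 == a && q.2 == -1)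

theorem pvExcl_nil (a : String) : pvExcl [] a = false := rfl

theorem pvExcl_cons (q : String × Int) (t : List (String × Int)) (a : String) :
    pvExcl (q :: t) a = ((q.1 == a && q.2 == -1) || pvExcl t a) := by
  simp [pvExcl]

theorem pvExcl_append (l m : List (String × Int)) (a : String) :
    pvExcl (l ++ m) a = (pvExcl l a || pvExcl m a) := by
  simp [pvExcl, List.any_append]

-- one A-step, characterised as a map over the items (needs unique keys)
theorem pvStepA_items (f : PySem.Dict String Int) (q : String × Int)
    (h : f.keys.Nodup) :
    (pvStepA f q).items
      = f.items.map (fun p => if p.1 = q.1 then (p.1, pvMergeSkill p.2 q.2) else p) := by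
  unfold pvStepA
  by_cases hc : f.contains q.1
  · rw [if_pos hc, PySem.Dict.items_insert_of_contains _ _ hc]
    apply List.map_congr_left
    intro p hp
    by_cases he : p.1 = q.1
    · have hget : f.getD q.1 0 = p.2 :=
        PySem.Dict.getD_of_mem_items f (by rw [← he]; simpa using hp) h 0
      simp [he, hget]
    · simp [he]
  · rw [if_neg hc]
    have hnone : ∀ p ∈ f.items, p.1 ≠ q.1 := by
      intro p hp he
      exact hc (by
        rw [PySem.Dict.contains_eq_decide_mem_keys]
        simp only [decide_eq_true_eq]
        exact he ▸ PySem.Dict.mem_keys_of_mem_items f hp)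
    have hmap : f.items.map (fun p => if p.1 = q.1 then (p.1, pvMergeSkill p.2 q.2) else p)
        = f.items.map id := List.map_congr_left (fun p hp => by simp [hnone p hp])
    rw [hmap, List.map_id]

theorem pvStepA_keys (f : PySem.Dict String Int) (q : String × Int) :
    (pvStepA f q).keys = f.keys := by
  unfold pvStepA
  by_cases hc : f.contains q.1
  · rw [if_pos hc]
    exact PySem.Dict.keys_insert_of_contains _ _ hc
  · rw [if_neg hc]

-- the whole A-loop over l, characterised as a single map over the items
theorem pvFoldA_items (l : List (String × Int)) (f : PySem.Dict String Int)
    (h : f.keys.Nodup) :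
    (l.foldl pvStepA f).items
      = f.items.map (fun p => if pvExcl l p.1 then (p.1, -1) else p) := by
  induction l generalizing f with
  | nil =>
    simp [pvExcl_nil]
  | cons q t ih =>
    rw [List.foldl_cons, ih (pvStepA f q) (by rw [pvStepA_keys]; exact h),
        pvStepA_items f q h, List.map_map]
    apply List.map_congr_left
    rintro ⟨pa, pb⟩ _
    by_cases he : pa = q.1
    · subst he
      by_cases hm : q.2 = -1
      · simp [Function.comp, hm, pvExcl_cons, pvMergeSkill]
      · simp [Function.comp, hm, pvExcl_cons, pvMergeSkill]
    · have hne : (q.1 == pa) = false := by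
        simp [Ne.symm he]
      simp [Function.comp, he, pvExcl_cons, hne]

-- membership in B's exclusion set is pvExcl
theorem pvExcluded_contains (l : List (String × Int)) (a : String) :
    PySem.Set.contains (PySem.Set.ofList ((l.filter (fun q => q.2 == -1)).map (·.1))) a
      = pvExcl l a := by
  rcases h : pvExcl l a with _ | _
  · simp only [pvExcl, List.any_eq_false] at h
    simp only [PySem.Set.contains_eq_listContains, List.contains_eq_mem,
      PySem.Set.mem_ofList, List.mem_map, List.mem_filter, decide_eq_false_iff_not]
    rintro ⟨q, ⟨hq, hv⟩, rfl⟩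
    have := h q hq
    simp only [Bool.and_eq_true] at this
    exact this ⟨by simp, by simpa using hv⟩
  · simp only [pvExcl, List.any_eq_true] at h
    obtain ⟨q, hq, hqa⟩ := h
    have h1 : q.1 = a := by simpa using (Bool.and_eq_true_iff.mp hqa).1
    have h2 : q.2 = -1 := by simpa using (Bool.and_eq_true_iff.mp hqa).2
    simp only [PySem.Set.contains_eq_listContains, List.contains_eq_mem,
      PySem.Set.mem_ofList, List.mem_map, decide_eq_true_eq]
    exact ⟨q, List.mem_filter.mpr ⟨hq, by simp [h2]⟩, h1⟩

-- a guarded fold over d.getD k [] equals the unguarded one (the guard only skips an empty fold)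
theorem pvGuardFold (entry : PySem.Dict String (List (String × Int))) (k : String)
    (f : PySem.Dict String Int) :
    (if entry.contains k then (entry.getD k []).foldl pvStepA f else f)
      = (entry.getD k []).foldl pvStepA f := by
  by_cases hc : entry.contains k
  · rw [if_pos hc]
  · rw [if_neg hc, PySem.Dict.getD_of_not_contains _ _ (by simpa using hc)]
    rfl

-- ===== VERDICT (by name: the statement is the Claim_ definition above) =====
theorem apply_roster_overrides_spec : Claim_equal_apply_roster_overrides := by
  intro base_skills canonical_id modality worker_roster _ hpre
  unfold Spec_apply_roster_overrides
  unfold apply_roster_overrides apply_roster_overrides_alt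
  simp only []
  by_cases hc : (PySem.Dict.mk worker_roster).contains canonical_id
  · have hnc : (!(PySem.Dict.mk worker_roster).contains canonical_id) = false := by simp [hc]
    simp only [hnc, Bool.false_eq_true, if_false]
    set entry := PySem.Dict.mk ((PySem.Dict.mk worker_roster).getD canonical_id []) with hentry
    have hkeys : (PySem.Dict.mk base_skills).keys.Nodup := by
      simpa [PySem.Dict.keys] using hpre
    rw [pvGuardFold entry "default" (PySem.Dict.mk base_skills)]
    have hkeys1 : ((entry.getD "default" []).foldl pvStepA (PySem.Dict.mk base_skills)).keys.Nodup := by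
      have : ∀ (l : List (String × Int)) (f : PySem.Dict String Int),
          (l.foldl pvStepA f).keys = f.keys := by
        intro l
        induction l with
        | nil => intro f; rfl
        | cons q t ih => intro f; rw [List.foldl_cons, ih, pvStepA_keys]
      rw [this]; exact hkeys
    rw [pvGuardFold entry modality _]
    rw [pvFoldA_items _ _ hkeys1, pvFoldA_items _ _ hkeys]
    have hitems : (PySem.Dict.mk base_skills).items = base_skills := rfl
    rw [hitems, List.map_map]
    apply List.map_congr_left
    intro p _
    rw [pvExcluded_contains, pvExcl_append]
    by_cases h1 : pvExcl (entry.getD "default" []) p.1 <;>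
      by_cases h2 : pvExcl (entry.getD modality []) p.1 <;>
        simp [Function.comp, h1, h2]
  · have hnt : (!(PySem.Dict.mk worker_roster).contains canonical_id) = true := by simp [hc]
    simp only [hnt, if_true]
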